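-- pv_equiv track=rewrite | github.com/pypi-data/pypi-mirror-242 | packages/market-break/market-break-1.0.2.tar.gz/market-break-1.0.2/market_break/experiment.py | minimum_maximum_index
-- ===== SOURCE A (Python) =====
-- from typing import Iterable, Sequence
--
-- def minimum_maximum_index(
--         data: Sequence[float], up: Sequence[int], down: Sequence[int]
-- ) -> tuple[list[int], list[int]]:
--     """
--     Calculates the minimum and maximum signals from the trends.
--
--     :param data: The data for the indicator.
--     :param up: The up-trends indexes.
--     :param down: The down-trends indexes.
--
--     :return: The minimum and maximum indexes.
--     """
--
--     buy = []
--     sell = []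
--
--     for i in range(len(data)):
--         if (i in up) and (len(buy) == len(sell)):
--             up = up[up.index(i) + 1:]
--
--             buy.append(i)
--
--         elif (i in down) and (len(buy) > len(sell)):
--             down = down[down.index(i) + 1:]
--
--             sell.append(i)
--         # end if
--     # end for
--
--     return buy, sell
-- ===== SOURCE B (Python) =====
-- def minimum_maximum_index(data, up, down):
--     # Index each trend value to its ascending list of positions once; a single
--     # pass with monotone cutoffs replaces A's repeated membership scans and
--     # slicing of the up/down lists (amortized O(n + m) vs A's O(n*m)).
--     pos_up = {}
--     for p, v in enumerate(up):
--         pos_up.setdefault(v, []).append(p)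
--     pos_down = {}
--     for p, v in enumerate(down):
--         pos_down.setdefault(v, []).append(p)
--
--     buy = []
--     sell = []
--     cu = 0  # up positions before cu are consumed (A's discarded prefix)
--     cd = 0
--
--     for i in range(len(data)):
--         if len(buy) == len(sell):
--             ps = pos_up.get(i)
--             if ps is not None:
--                 k = 0
--                 while k < len(ps) and ps[k] < cu:
--                     k += 1
--                 if k < len(ps):
--                     cu = ps[k] + 1
--                     pos_up[i] = ps[k + 1:]
--                     buy.append(i)
--                 else:
--                     pos_up[i] = []
--         else:
--             ps = pos_down.get(i)
--             if ps is not None: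
--                 k = 0
--                 while k < len(ps) and ps[k] < cd:
--                     k += 1
--                 if k < len(ps):
--                     cd = ps[k] + 1
--                     pos_down[i] = ps[k + 1:]
--                     sell.append(i)
--                 else:
--                     pos_down[i] = []
--
--     return buy, sell
-- ===== Notes on version B (the rewrite author's own statement) =====
-- stated objective: faster
-- what changed: B builds a value-to-positions dictionary for up and down once, then replays A's prefix-removal scans with monotone integer cutoffs in a single pass, replacing A's per-iteration membership scans, .index calls and list slicing.
import Mathlib
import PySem

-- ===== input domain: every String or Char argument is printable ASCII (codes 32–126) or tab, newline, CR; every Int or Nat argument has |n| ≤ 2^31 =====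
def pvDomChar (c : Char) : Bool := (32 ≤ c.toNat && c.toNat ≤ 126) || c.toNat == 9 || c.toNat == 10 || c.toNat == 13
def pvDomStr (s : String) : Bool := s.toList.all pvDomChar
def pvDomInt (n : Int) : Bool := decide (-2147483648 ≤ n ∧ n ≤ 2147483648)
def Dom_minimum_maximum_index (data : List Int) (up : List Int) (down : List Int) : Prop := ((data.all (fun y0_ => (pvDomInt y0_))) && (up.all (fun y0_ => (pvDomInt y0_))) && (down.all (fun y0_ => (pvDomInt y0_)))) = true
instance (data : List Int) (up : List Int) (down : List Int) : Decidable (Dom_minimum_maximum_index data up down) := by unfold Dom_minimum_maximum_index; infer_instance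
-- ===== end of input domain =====

-- B builds a value→positions index once and replays A's prefix-removal scans with
-- monotone integer cutoffs in a single pass (objective: faster).

-- ===== PORT A =====
-- one iteration of A's `for i in range(len(data))` body; state = (up, down, buy, sell)
def mmiStepA (st : List Int × List Int × List Int × List Int) (i : Int) :
    List Int × List Int × List Int × List Int :=
  match st with
  | (u, d, b, s) =>
    if i ∈ u ∧ b.length = s.length then
      -- up = up[up.index(i) + 1:]; the `none` branch is unreachable (i ∈ u)
      ((match PySem.List.index? u i with
        | some idx => PySem.List.slice u (some ((idx : Int) + 1)) none
        | none => u), d, b ++ [i], s)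
    else if i ∈ d ∧ b.length > s.length then
      (u, (match PySem.List.index? d i with
           | some idx => PySem.List.slice d (some ((idx : Int) + 1)) none
           | none => d), b, s ++ [i])
    else st

def minimum_maximum_index (data : List Int) (up : List Int) (down : List Int) :
    List Int × List Int :=
  let st := (PySem.List.pyRange 0 (data.length : Int) 1).foldl mmiStepA (up, down, [], [])
  (st.2.2.1, st.2.2.2)

-- ===== PORT B =====
-- pos.setdefault(v, []).append(p)  ≡  modify v [] (· ++ [p])
def mmiBuild (l : List Int) : PySem.Dict Int (List Int) :=
  (PySem.List.enumerate l 0).foldl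
    (fun d pv => d.modify pv.2 [] (fun ps => ps ++ [pv.1])) PySem.Dict.empty

-- one iteration of B's main loop; state = (pos_up, pos_down, cu, cd, buy, sell)
def mmiStepB
    (st : PySem.Dict Int (List Int) × PySem.Dict Int (List Int) × Int × Int × List Int × List Int)
    (i : Int) :
    PySem.Dict Int (List Int) × PySem.Dict Int (List Int) × Int × Int × List Int × List Int :=
  match st with
  | (pu, pd, cu, cd, b, s) =>
    if b.length = s.length then
      match pu.get? i with
      | none => (pu, pd, cu, cd, b, s)
      | some ps =>
        -- the `while k < len(ps) and ps[k] < cu` loop: what survives is ps[k:]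
        match ps.dropWhile (fun p => p < cu) with
        | [] => (pu.insert i [], pd, cu, cd, b, s)
        | p :: tl => (pu.insert i tl, pd, p + 1, cd, b ++ [i], s)
    else
      match pd.get? i with
      | none => (pu, pd, cu, cd, b, s)
      | some ps =>
        match ps.dropWhile (fun p => p < cd) with
        | [] => (pu, pd.insert i [], cu, cd, b, s)
        | p :: tl => (pu, pd.insert i tl, cu, p + 1, b, s ++ [i])

def minimum_maximum_index_alt (data : List Int) (up : List Int) (down : List Int) :
    List Int × List Int :=
  let st := (PySem.List.pyRange 0 (data.length : Int) 1).foldl mmiStepB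
    (mmiBuild up, mmiBuild down, 0, 0, [], [])
  (st.2.2.2.2.1, st.2.2.2.2.2)

-- ===== PRECONDITION & SPEC =====
def Spec_minimum_maximum_index (data : List Int) (up : List Int) (down : List Int) (out : List Int × List Int) : Prop := out = minimum_maximum_index_alt data up down
instance (data : List Int) (up : List Int) (down : List Int) (out : List Int × List Int) : Decidable (Spec_minimum_maximum_index data up down out) := by unfold Spec_minimum_maximum_index; infer_instance

-- ===== CLAIM (what is proved, stated in full; the proofs are below) =====
def Claim_equal_minimum_maximum_index : Prop := ∀ (data : List Int) (up : List Int) (down : List Int), Dom_minimum_maximum_index data up down → Spec_minimum_maximum_index data up down (minimum_maximum_index data up down)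

-- ===== LEMMAS AND PROOFS =====

def posN : List Int → Int → List Nat
  | [], _ => []
  | a :: l, v => if a = v then 0 :: (posN l v).map (· + 1) else (posN l v).map (· + 1)

def posZ (l : List Int) (v : Int) : List Int := (posN l v).map (fun p : Nat => (p : Int))

theorem posN_eq_nil_iff (l : List Int) (v : Int) : posN l v = [] ↔ v ∉ l := by
  induction l with
  | nil => simp [posN]
  | cons a l ih =>
    by_cases h : a = v
    · subst h; simp [posN]
    · simp only [posN, if_neg h, List.map_eq_nil_iff, ih, List.mem_cons, not_or]
      constructor
      · intro hv; exact ⟨fun he => h he.symm, hv⟩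
      · intro hv; exact hv.2

theorem index?_eq_head?_posN (l : List Int) (v : Int) :
    PySem.List.index? l v = (posN l v).head? := by
  induction l with
  | nil => simp [posN, PySem.List.index?_eq_idxOf?]
  | cons a l ih =>
    by_cases h : a = v
    · subst h; rw [PySem.List.index?_cons_self]; simp [posN]
    · rw [PySem.List.index?_cons_of_ne l h, ih]
      simp only [posN, if_neg h, List.head?_map]

theorem dropWhile_posN (l : List Int) (v : Int) (c : Nat) :
    (posN l v).dropWhile (fun p => p < c) = (posN (l.drop c) v).map (c + ·) := by
  induction c generalizing l with
  | zero =>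
    simp only [List.drop_zero]
    rw [List.dropWhile_eq_self_iff.mpr (by intro hl; simp)]
    simp
  | succ c ih =>
    have hmapdw : ∀ (X : List Nat),
        (X.map (· + 1)).dropWhile (fun p => decide (p < (c + 1 : Nat))) =
          (X.dropWhile (fun p => decide (p < c))).map (· + 1) := by
      intro X
      have hp : ((fun p : Nat => decide (p < c + 1)) ∘ fun x => x + 1)
          = (fun p : Nat => decide (p < c)) := by
        funext x
        simp only [Function.comp_apply, decide_eq_decide]
        omega
      rw [List.dropWhile_map, hp]
    cases l with
    | nil => simp [posN]
    | cons a l =>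
      by_cases h : a = v
      · simp only [posN, if_pos h, List.dropWhile_cons]
        rw [if_pos (by simp)]
        rw [hmapdw, ih l, List.map_map, List.drop_succ_cons]
        apply List.map_congr_left
        intro x hx
        simp only [Function.comp_apply]
        omega
      · simp only [posN, if_neg h, List.drop_succ_cons]
        rw [hmapdw, ih l, List.map_map]
        apply List.map_congr_left
        intro x hx
        simp only [Function.comp_apply]
        omega


theorem enum_filter_map (l : List Int) (v : Int) (s : Int) :
    (((PySem.List.enumerate l s).filter (fun q => q.2 == v)).map (fun q => q.1)) =
      (posN l v).map (fun p : Nat => s + (p : Int)) := by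
  induction l generalizing s with
  | nil => simp [posN, PySem.List.enumerate_nil]
  | cons a l ih =>
    rw [PySem.List.enumerate_cons]
    by_cases h : a = v
    · rw [List.filter_cons_of_pos (by simpa using h)]
      rw [List.map_cons, ih (s+1)]
      simp only [posN, if_pos h, List.map_cons, List.map_map]
      refine List.cons_eq_cons.mpr ⟨by omega, ?_⟩
      apply List.map_congr_left
      intro x hx
      simp only [Function.comp_apply]
      push_cast
      ring
    · rw [List.filter_cons_of_neg (by simpa using h)]
      rw [ih (s+1)]
      simp only [posN, if_neg h, List.map_map]
      apply List.map_congr_left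
      intro x hx
      simp only [Function.comp_apply]
      push_cast
      ring

theorem mmiBuild_getD (l : List Int) (v : Int) :
    (mmiBuild l).getD v [] = posZ l v := by
  unfold mmiBuild
  have hfm := List.foldl_map (f := fun q : Int × Int => (q.2, q.1))
    (g := fun (d : PySem.Dict Int (List Int)) (p : Int × Int) =>
      d.modify p.1 [] (fun ps => ps ++ [p.2]))
    (l := PySem.List.enumerate l 0) (init := PySem.Dict.empty)
  rw [show (PySem.List.enumerate l 0).foldl
      (fun d pv => d.modify pv.2 [] (fun ps => ps ++ [pv.1])) PySem.Dict.empty =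
    ((PySem.List.enumerate l 0).map (fun q => (q.2, q.1))).foldl
      (fun d pv => d.modify pv.1 [] (fun ps => ps ++ [pv.2])) PySem.Dict.empty from hfm.symm]
  rw [PySem.Dict.getD_foldl_modify_append]
  simp only [PySem.Dict.getD_empty, List.nil_append, List.filter_map, List.map_map]
  have h := enum_filter_map l v 0
  simp only [zero_add] at h
  unfold posZ
  simp only [Function.comp_def]
  exact h

def DInv (l0 : List Int) (c : Nat) (dct : PySem.Dict Int (List Int)) : Prop :=
  ∀ v : Int, ∃ k : Nat, dct.getD v [] = (posZ l0 v).drop k ∧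
    ∀ p ∈ (posZ l0 v).take k, p < (c : Int)

theorem dropWhile_stale (full entry : List Int) (k : Nat) (c : Int)
    (he : entry = full.drop k) (hlt : ∀ p ∈ full.take k, p < c) :
    entry.dropWhile (fun p => p < c) = full.dropWhile (fun p => p < c) := by
  have h2 : (List.dropWhile (fun p => decide (p < c)) (full.take k)).isEmpty = true := by
    rw [List.isEmpty_iff, List.dropWhile_eq_nil_iff]
    intro x hx
    simpa using hlt x hx
  conv_rhs => rw [← List.take_append_drop k full]
  rw [List.dropWhile_append, if_pos h2, he]

theorem dropWhile_posZ (l : List Int) (v : Int) (c : Nat) :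
    (posZ l v).dropWhile (fun p => p < (c : Int)) =
      (posN (l.drop c) v).map (fun j : Nat => ((c + j : Nat) : Int)) := by
  unfold posZ
  rw [List.dropWhile_map]
  have hp : ((fun p : Int => decide (p < (c : Int))) ∘ fun p : Nat => (p : Int))
      = (fun p : Nat => decide (p < c)) := by
    funext x
    simp only [Function.comp_apply, decide_eq_decide]
    omega
  rw [hp, dropWhile_posN, List.map_map]
  apply List.map_congr_left
  intro x hx
  simp only [Function.comp_apply]

theorem DInv_core (l0 : List Int) (c : Nat) (dct : PySem.Dict Int (List Int)) (i : Int)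
    (h : DInv l0 c dct) :
    ((dct.get? i = none → i ∉ l0.drop c) ∧
     (∀ ps, dct.get? i = some ps →
        (ps.dropWhile (fun p => p < (c : Int)) = [] →
          i ∉ l0.drop c ∧ DInv l0 c (dct.insert i [])) ∧
        (∀ p tl, ps.dropWhile (fun p => p < (c : Int)) = p :: tl →
          ∃ j : Nat, PySem.List.index? (l0.drop c) i = some j ∧
            p = ((c + j : Nat) : Int) ∧ i ∈ l0.drop c ∧
            DInv l0 (c + j + 1) (dct.insert i tl)))) := by
  obtain ⟨k, hk, hlt⟩ := h i
  constructor
  · -- get? = none: the entry is [], so i has no position ≥ c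
    intro hn
    have hge : dct.getD i [] = [] := PySem.Dict.getD_of_get?_eq_none dct [] hn
    have h1 : ([] : List Int).dropWhile (fun p => p < (c : Int)) =
        (posZ l0 i).dropWhile (fun p => p < (c : Int)) :=
      dropWhile_stale _ _ k _ (hge ▸ hk) hlt
    rw [List.dropWhile_nil, dropWhile_posZ] at h1
    have hpn : posN (l0.drop c) i = [] := by
      cases hpn : posN (l0.drop c) i with
      | nil => rfl
      | cons x xs => rw [hpn] at h1; simp at h1
    exact (posN_eq_nil_iff _ _).mp hpn
  · intro ps hps
    have hge : dct.getD i [] = ps := PySem.Dict.getD_of_get?_eq_some dct [] hps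
    have hentry : ps = (posZ l0 i).drop k := hge ▸ hk
    have hdwfull : ps.dropWhile (fun p => p < (c : Int)) =
        (posN (l0.drop c) i).map (fun j : Nat => ((c + j : Nat) : Int)) := by
      rw [dropWhile_stale _ _ k _ hentry hlt, dropWhile_posZ]
    constructor
    · -- every surviving position is below the cutoff: i ∉ l0.drop c
      intro hdw
      rw [hdw] at hdwfull
      have hpn : posN (l0.drop c) i = [] := by
        cases hpn : posN (l0.drop c) i with
        | nil => rfl
        | cons x xs => rw [hpn] at hdwfull; simp at hdwfull
      refine ⟨(posN_eq_nil_iff _ _).mp hpn, ?_⟩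
      intro v
      by_cases hv : v = i
      · subst hv
        refine ⟨(posZ l0 v).length, ?_, ?_⟩
        · rw [PySem.Dict.getD_insert, if_pos rfl, List.drop_length]
        · rw [List.take_length]
          intro p hp
          rw [← List.take_append_drop k (posZ l0 v), ← hentry] at hp
          rcases List.mem_append.mp hp with h1 | h2
          · exact hlt p h1
          · have := List.dropWhile_eq_nil_iff.mp hdw p h2
            simpa using this
      · obtain ⟨kv, hkv, hltv⟩ := h v
        refine ⟨kv, ?_, hltv⟩
        rw [PySem.Dict.getD_insert, if_neg hv]
        exact hkv
    · intro p tl hdw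
      rw [hdw] at hdwfull
      cases hpn : posN (l0.drop c) i with
      | nil => rw [hpn] at hdwfull; simp at hdwfull
      | cons j tl0 =>
        rw [hpn] at hdwfull
        simp only [List.map_cons, List.cons.injEq] at hdwfull
        obtain ⟨hpj, htl⟩ := hdwfull
        refine ⟨j, ?_, hpj, ?_, ?_⟩
        · rw [index?_eq_head?_posN, hpn]
          rfl
        · by_contra hm
          have := (posN_eq_nil_iff (l0.drop c) i).mpr hm
          rw [hpn] at this
          simp at this
        · intro v
          by_cases hv : v = i
          · subst hv
            set T := (posZ l0 v).take k with hT
            set TW := ps.takeWhile (fun q => q < (c : Int)) with hTW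
            have hps_split : ps = TW ++ (p :: tl) := by
              rw [hTW, ← hdw, List.takeWhile_append_dropWhile]
            have hfull : posZ l0 v = (T ++ (TW ++ [p])) ++ tl := by
              conv_lhs => rw [← List.take_append_drop k (posZ l0 v), ← hentry, ← hT,
                hps_split]
              simp
            refine ⟨(T ++ (TW ++ [p])).length, ?_, ?_⟩
            · rw [PySem.Dict.getD_insert, if_pos rfl, hfull, List.drop_left]
            · rw [hfull, List.take_left]
              intro q hq
              have hcle : ((c : Int)) ≤ ((c + j + 1 : Nat) : Int) := by
                push_cast
                omega
              rcases List.mem_append.mp hq with h1 | h2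
              · exact lt_of_lt_of_le (hlt q (hT ▸ h1)) hcle
              · rcases List.mem_append.mp h2 with h5 | h6
                · have := List.mem_takeWhile_imp (hTW ▸ h5)
                  simp only [decide_eq_true_eq] at this
                  exact lt_of_lt_of_le this hcle
                · simp only [List.mem_singleton] at h6
                  subst h6
                  rw [hpj]
                  push_cast
                  omega
          · obtain ⟨kv, hkv, hltv⟩ := h v
            refine ⟨kv, ?_, ?_⟩
            · rw [PySem.Dict.getD_insert, if_neg hv]
              exact hkv
            · intro q hq
              have := hltv q hq
              push_cast
              omega



def MMRel (up0 down0 : List Int)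
    (sa : List Int × List Int × List Int × List Int)
    (sb : PySem.Dict Int (List Int) × PySem.Dict Int (List Int) × Int × Int × List Int × List Int) :
    Prop :=
  ∃ cu cd : Nat,
    sb.2.2.1 = (cu : Int) ∧ sb.2.2.2.1 = (cd : Int) ∧
    sa.1 = up0.drop cu ∧ sa.2.1 = down0.drop cd ∧
    sa.2.2.1 = sb.2.2.2.2.1 ∧ sa.2.2.2 = sb.2.2.2.2.2 ∧
    (sa.2.2.1.length = sa.2.2.2.length ∨ sa.2.2.1.length = sa.2.2.2.length + 1) ∧
    DInv up0 cu sb.1 ∧ DInv down0 cd sb.2.1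

theorem drop_drop_eq (l : List Int) (c j : Nat) :
    (l.drop c).drop (j + 1) = l.drop (c + j + 1) := by
  rw [List.drop_drop, Nat.add_assoc]

theorem MMRel_step (up0 down0 : List Int) (sa sb) (i : Int)
    (h : MMRel up0 down0 sa sb) : MMRel up0 down0 (mmiStepA sa i) (mmiStepB sb i) := by
  obtain ⟨u, d, b, s⟩ := sa
  obtain ⟨pu, pd, cuI, cdI, bb, ss⟩ := sb
  obtain ⟨cu, cd, hbu, hbd, hu, hd, hb, hs, hlen, hIU, hID⟩ := h
  dsimp only at hbu hbd hu hd hb hs hlen hIU hID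
  subst hbu hbd hu hd hb hs
  by_cases hbal : b.length = s.length
  · -- balanced: only the up side can act
    have hngt : ¬ (b.length > s.length) := by omega
    cases hget : pu.get? i with
    | none =>
      have hni : i ∉ up0.drop cu := (DInv_core up0 cu pu i hIU).1 hget
      have hAv : mmiStepA (up0.drop cu, down0.drop cd, b, s) i =
          (up0.drop cu, down0.drop cd, b, s) := by
        simp [mmiStepA, hni, hngt]
      have hBv : mmiStepB (pu, pd, (cu : Int), (cd : Int), b, s) i =
          (pu, pd, (cu : Int), (cd : Int), b, s) := by
        simp [mmiStepB, hbal, hget]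
      rw [hAv, hBv]
      exact ⟨cu, cd, rfl, rfl, rfl, rfl, rfl, rfl, hlen, hIU, hID⟩
    | some ps =>
      have hcore := ((DInv_core up0 cu pu i hIU).2 ps hget)
      cases hdw : ps.dropWhile (fun p => p < (cu : Int)) with
      | nil =>
        obtain ⟨hni, hinv⟩ := hcore.1 hdw
        have hAv : mmiStepA (up0.drop cu, down0.drop cd, b, s) i =
            (up0.drop cu, down0.drop cd, b, s) := by
          simp [mmiStepA, hni, hngt]
        have hBv : mmiStepB (pu, pd, (cu : Int), (cd : Int), b, s) i =
            (pu.insert i [], pd, (cu : Int), (cd : Int), b, s) := by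
          simp [mmiStepB, hbal, hget, hdw]
        rw [hAv, hBv]
        exact ⟨cu, cd, rfl, rfl, rfl, rfl, rfl, rfl, hlen, hinv, hID⟩
      | cons p tl =>
        obtain ⟨j, hidx, hpj, hmem, hinv⟩ := hcore.2 p tl hdw
        have hAv : mmiStepA (up0.drop cu, down0.drop cd, b, s) i =
            (PySem.List.slice (up0.drop cu) (some ((j : Int) + 1)) none,
              down0.drop cd, b ++ [i], s) := by
          simp only [mmiStepA]
          rw [if_pos ⟨hmem, hbal⟩, hidx]
        have hslice : PySem.List.slice (up0.drop cu) (some ((j : Int) + 1)) none =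
            up0.drop (cu + j + 1) := by
          rw [show ((j : Int) + 1) = ((j + 1 : Nat) : Int) from by push_cast; ring,
            PySem.List.slice_from_natCast, drop_drop_eq]
        have hBv : mmiStepB (pu, pd, (cu : Int), (cd : Int), b, s) i =
            (pu.insert i tl, pd, p + 1, (cd : Int), b ++ [i], s) := by
          simp [mmiStepB, hbal, hget, hdw]
        rw [hAv, hslice, hBv]
        refine ⟨cu + j + 1, cd, ?_, rfl, rfl, rfl, rfl, rfl, ?_, hinv, hID⟩
        · dsimp only
          rw [hpj]
          push_cast
          ring
        · right
          simp [hbal]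
  · -- unbalanced: buy = sell + 1, only the down side can act
    have hgt : b.length = s.length + 1 := by
      rcases hlen with h1 | h1
      · exact absurd h1 hbal
      · exact h1
    have hgt' : b.length > s.length := by omega
    cases hget : pd.get? i with
    | none =>
      have hni : i ∉ down0.drop cd := (DInv_core down0 cd pd i hID).1 hget
      have hAv : mmiStepA (up0.drop cu, down0.drop cd, b, s) i =
          (up0.drop cu, down0.drop cd, b, s) := by
        simp [mmiStepA, hni, hbal]
      have hBv : mmiStepB (pu, pd, (cu : Int), (cd : Int), b, s) i =
          (pu, pd, (cu : Int), (cd : Int), b, s) := by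
        simp [mmiStepB, hbal, hget]
      rw [hAv, hBv]
      exact ⟨cu, cd, rfl, rfl, rfl, rfl, rfl, rfl, hlen, hIU, hID⟩
    | some ps =>
      have hcore := ((DInv_core down0 cd pd i hID).2 ps hget)
      cases hdw : ps.dropWhile (fun p => p < (cd : Int)) with
      | nil =>
        obtain ⟨hni, hinv⟩ := hcore.1 hdw
        have hAv : mmiStepA (up0.drop cu, down0.drop cd, b, s) i =
            (up0.drop cu, down0.drop cd, b, s) := by
          simp [mmiStepA, hni, hbal]
        have hBv : mmiStepB (pu, pd, (cu : Int), (cd : Int), b, s) i =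
            (pu, pd.insert i [], (cu : Int), (cd : Int), b, s) := by
          simp [mmiStepB, hbal, hget, hdw]
        rw [hAv, hBv]
        exact ⟨cu, cd, rfl, rfl, rfl, rfl, rfl, rfl, hlen, hIU, hinv⟩
      | cons p tl =>
        obtain ⟨j, hidx, hpj, hmem, hinv⟩ := hcore.2 p tl hdw
        have hAv : mmiStepA (up0.drop cu, down0.drop cd, b, s) i =
            (up0.drop cu,
              PySem.List.slice (down0.drop cd) (some ((j : Int) + 1)) none,
              b, s ++ [i]) := by
          simp only [mmiStepA]
          rw [if_neg (fun hc => hbal hc.2), if_pos ⟨hmem, hgt'⟩, hidx]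
        have hslice : PySem.List.slice (down0.drop cd) (some ((j : Int) + 1)) none =
            down0.drop (cd + j + 1) := by
          rw [show ((j : Int) + 1) = ((j + 1 : Nat) : Int) from by push_cast; ring,
            PySem.List.slice_from_natCast, drop_drop_eq]
        have hBv : mmiStepB (pu, pd, (cu : Int), (cd : Int), b, s) i =
            (pu, pd.insert i tl, (cu : Int), p + 1, b, s ++ [i]) := by
          simp [mmiStepB, hbal, hget, hdw]
        rw [hAv, hslice, hBv]
        refine ⟨cu, cd + j + 1, rfl, ?_, rfl, rfl, rfl, rfl, ?_, hIU, hinv⟩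
        · dsimp only
          rw [hpj]
          push_cast
          ring
        · left
          simp [hgt]

theorem MMRel_foldl (up0 down0 : List Int) (is : List Int) (sa sb)
    (h : MMRel up0 down0 sa sb) :
    MMRel up0 down0 (is.foldl mmiStepA sa) (is.foldl mmiStepB sb) := by
  induction is generalizing sa sb with
  | nil => exact h
  | cons i is ih => exact ih _ _ (MMRel_step up0 down0 sa sb i h)

theorem DInv_init (l0 : List Int) : DInv l0 0 (mmiBuild l0) := by
  intro v
  exact ⟨0, by simp [mmiBuild_getD], by simp⟩

-- ===== VERDICT (by name: the statement is the Claim_ definition above) =====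
theorem minimum_maximum_index_spec : Claim_equal_minimum_maximum_index := by
  intro data up down _
  have h0 : MMRel up down (up, down, [], [])
      (mmiBuild up, mmiBuild down, 0, 0, [], []) :=
    ⟨0, 0, rfl, rfl, by simp, by simp, rfl, rfl, Or.inl rfl, DInv_init up, DInv_init down⟩
  have h := MMRel_foldl up down (PySem.List.pyRange 0 (data.length : Int) 1) _ _ h0
  obtain ⟨cu, cd, -, -, -, -, hb, hs, -, -, -⟩ := h
  unfold Spec_minimum_maximum_index minimum_maximum_index minimum_maximum_index_alt
  exact Prod.ext_iff.mpr ⟨hb, hs⟩
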